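-- pv_equiv track=rewrite | github.com/kabhi99/System-Design | format_txt_to_md.py | pad_block
-- ===== SOURCE A (Python) =====
-- def find_border_tail(line):
--     """Scan from right to find where the nested border tail starts.
--
--     Border tail = the rightmost sequence of border chars (| or +)
--     each separated by 1-4 spaces.  E.g. '|  |  |' or '+  |' or '|'.
--     Returns the start position, or -1 if none found.
--     """
--     i = len(line) - 1
--     while i >= 0 and line[i] == ' ':
--         i -= 1
--     if i < 0 or line[i] not in '|+':
--         return -1
--     last_border = i
--     i -= 1
--     while i >= 0:
--         spaces = 0
--         while i >= 0 and line[i] == ' ':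
--             spaces += 1
--             i -= 1
--         if 1 <= spaces <= 4 and i >= 0 and line[i] in '|+':
--             last_border = i
--             i -= 1
--         else:
--             break
--     return last_border
--
-- def pad_block(block):
--     """Pad lines in a code block so right-side borders align consistently."""
--     non_empty = [l for l in block if l.strip()]
--     if not non_empty:
--         return block
--     max_len = max(len(l) for l in non_empty)
--     result = []
--     for l in block:
--         if not l.strip() or len(l) >= max_len:
--             result.append(l)
--             continue
--         diff = max_len - len(l)
--         stripped = l.rstrip()
--         tail_pos = find_border_tail(stripped)
--         if tail_pos > 0:
--             content = stripped[:tail_pos]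
--             tail = stripped[tail_pos:]
--             if content.endswith(('-', '=')):
--                 result.append(content + '-' * diff + tail)
--             else:
--                 result.append(content + ' ' * diff + tail)
--         elif stripped.endswith('|'):
--             result.append(stripped[:-1] + ' ' * diff + '|')
--         elif stripped.endswith('+'):
--             result.append(stripped[:-1] + '-' * diff + '+')
--         else:
--             result.append(l + ' ' * diff)
--     return result
-- ===== SOURCE B (Python) =====
-- def _tail_start(s):
--     """Forward single-pass state machine over s (assumed to have no trailing
--     spaces): track the start of the current candidate border chain and the
--     length of the space run since its last border char.
--     Returns the chain's start index, or -1 if s does not end in a chain."""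
--     start = -1
--     run = 0
--     for idx, ch in enumerate(s):
--         if ch == '|' or ch == '+':
--             if start != -1 and 1 <= run <= 4:
--                 run = 0          # chain continues through this border
--             else:
--                 start, run = idx, 0   # chain (re)starts here
--         elif ch == ' ':
--             if start != -1:
--                 run += 1
--         else:
--             start, run = -1, 0
--     return start if (start != -1 and run == 0) else -1
--
--
-- def _pad_line(l, max_len):
--     if not l.strip() or len(l) >= max_len:
--         return l
--     diff = max_len - len(l)
--     s = l.rstrip()
--     t = _tail_start(s)
--     if t > 0:
--         fill = '-' if s[t - 1] in '-=' else ' '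
--         return s[:t] + fill * diff + s[t:]
--     if t == 0:
--         fill = '-' if s[-1] == '+' else ' '
--         return s[:-1] + fill * diff + s[-1]
--     return l + ' ' * diff
--
--
-- def pad_block(block):
--     lens = [len(l) for l in block if l.strip()]
--     if not lens:
--         return block
--     max_len = max(lens)
--     return [_pad_line(l, max_len) for l in block]
-- ===== Notes on version B (the rewrite author's own statement) =====
-- stated objective: alternative
-- what changed: The hand-rolled right-to-left border-tail scan (outer while with a nested space-counting while) is replaced by a single forward left-to-right state machine over enumerate(s) tracking (chain start, space run), and the append-accumulator loop over the block by a per-line helper mapped over the block.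
import Mathlib
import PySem

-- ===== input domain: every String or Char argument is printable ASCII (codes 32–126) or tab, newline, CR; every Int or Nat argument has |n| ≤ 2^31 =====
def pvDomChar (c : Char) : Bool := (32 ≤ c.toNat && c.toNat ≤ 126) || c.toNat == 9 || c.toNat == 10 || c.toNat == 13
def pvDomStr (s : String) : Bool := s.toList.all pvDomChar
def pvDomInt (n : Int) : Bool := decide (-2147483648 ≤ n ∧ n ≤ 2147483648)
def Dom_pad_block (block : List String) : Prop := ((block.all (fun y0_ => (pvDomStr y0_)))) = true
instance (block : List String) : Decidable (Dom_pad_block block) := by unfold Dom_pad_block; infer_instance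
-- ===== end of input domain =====

-- B replaces A's right-to-left border-tail scan (nested while loops) by a forward one-pass
-- state machine over enumerate, and A's append-accumulator loop by a per-line helper mapped
-- over the block (objective: alternative; same asymptotic cost).

-- ===== PORT A =====
def pvBorder (c : Char) : Bool := c == '|' || c == '+'

def pvSkipSp (cs : List Char) : Nat → Nat
  | 0 => 0
  | k+1 => if cs.getD k '?' == ' ' then pvSkipSp cs k else k+1

theorem pvSkipSp_le (cs : List Char) (k : Nat) : pvSkipSp cs k ≤ k := by
  induction k with
  | zero => simp [pvSkipSp]
  | succ k ih => simp only [pvSkipSp]; split <;> omega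

def pvFbtLoop (cs : List Char) (lastBorder : Nat) (k : Nat) : Nat :=
  if k = 0 then lastBorder
  else
    let k' := pvSkipSp cs k
    if h : 1 ≤ k - k' ∧ k - k' ≤ 4 ∧ 1 ≤ k' ∧ pvBorder (cs.getD (k' - 1) '?') = true then
      pvFbtLoop cs (k' - 1) (k' - 1)
    else lastBorder
termination_by k
decreasing_by
  have := pvSkipSp_le cs k; omega

def pvFindBorderTail (cs : List Char) : Int :=
  let n := pvSkipSp cs cs.length
  if n = 0 then -1
  else if pvBorder (cs.getD (n-1) '?') = false then -1
  else ((pvFbtLoop cs (n-1) (n-1) : Nat) : Int)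

def pad_block (block : List String) : List String :=
  let non_empty := block.filter (fun l => !(PySem.Chars.strip l.toList).isEmpty)
  if non_empty.isEmpty then block
  else
    match PySem.List.max? (non_empty.map PySem.Str.len) (fun x => x) with
    | none => block
    | some max_len =>
      block.foldl (fun result l =>
        let cs := l.toList
        if (PySem.Chars.strip cs).isEmpty ∨ max_len ≤ PySem.Str.len l then
          result ++ [l]
        else
          let diff := (max_len - PySem.Str.len l).toNat
          let stripped := PySem.Chars.rstrip cs
          let tail_pos := pvFindBorderTail stripped
          if 0 < tail_pos then
            let content := PySem.List.slice stripped none (some tail_pos)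
            let tail := PySem.List.slice stripped (some tail_pos) none
            if PySem.Chars.endswith content ['-'] || PySem.Chars.endswith content ['='] then
              result ++ [String.ofList (content ++ List.replicate diff '-' ++ tail)]
            else
              result ++ [String.ofList (content ++ List.replicate diff ' ' ++ tail)]
          else if PySem.Chars.endswith stripped ['|'] then
            result ++ [String.ofList (PySem.List.slice stripped none (some (-1)) ++ List.replicate diff ' ' ++ ['|'])]
          else if PySem.Chars.endswith stripped ['+'] then
            result ++ [String.ofList (PySem.List.slice stripped none (some (-1)) ++ List.replicate diff '-' ++ ['+'])]
          else
            result ++ [String.ofList (cs ++ List.replicate diff ' ')]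
      ) []

-- ===== PORT B =====
def pvStep (st : Int × Nat) (p : Int × Char) : Int × Nat :=
  if p.2 == '|' || p.2 == '+' then
    if st.1 ≠ -1 ∧ 1 ≤ st.2 ∧ st.2 ≤ 4 then (st.1, 0) else (p.1, 0)
  else if p.2 == ' ' then
    if st.1 ≠ -1 then (st.1, st.2 + 1) else st
  else (-1, 0)

def pvTailStart (cs : List Char) : Int :=
  let fin := (PySem.List.enumerate cs 0).foldl pvStep (-1, 0)
  if fin.1 ≠ -1 ∧ fin.2 = 0 then fin.1 else -1

def pvPadLine (l : String) (maxLen : Int) : String :=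
  let cs := l.toList
  if (PySem.Chars.strip cs).isEmpty ∨ maxLen ≤ PySem.Str.len l then l
  else
    let diff := (maxLen - PySem.Str.len l).toNat
    let s := PySem.Chars.rstrip cs
    let t := pvTailStart s
    if 0 < t then
      let fill := if PySem.List.pyGetD s (t-1) '?' = '-' ∨ PySem.List.pyGetD s (t-1) '?' = '=' then '-' else ' '
      String.ofList (PySem.List.slice s none (some t) ++ List.replicate diff fill ++ PySem.List.slice s (some t) none)
    else if t = 0 then
      let fill := if PySem.List.pyGetD s (-1) '?' = '+' then '-' else ' '
      String.ofList (PySem.List.slice s none (some (-1)) ++ List.replicate diff fill ++ [PySem.List.pyGetD s (-1) '?'])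
    else String.ofList (cs ++ List.replicate diff ' ')

def pad_block_alt (block : List String) : List String :=
  let lens := (block.filter (fun l => !(PySem.Chars.strip l.toList).isEmpty)).map PySem.Str.len
  if lens.isEmpty then block
  else
    match PySem.List.max? lens (fun x => x) with
    | none => block
    | some maxLen => block.map (fun l => pvPadLine l maxLen)

-- ===== PRECONDITION & SPEC =====
def Spec_pad_block (block : List String) (out : List String) : Prop := out = pad_block_alt block
instance (block : List String) (out : List String) : Decidable (Spec_pad_block block out) := by unfold Spec_pad_block; infer_instance

-- ===== CLAIM (what is proved, stated in full; the proofs are below) =====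
def Claim_equal_pad_block : Prop := ∀ (block : List String), Dom_pad_block block → Spec_pad_block block (pad_block block)

-- ===== LEMMAS AND PROOFS =====
theorem pvSkipSp_append (cs ys : List Char) (k : Nat) (h : k ≤ cs.length) :
    pvSkipSp (cs ++ ys) k = pvSkipSp cs k := by
  induction k with
  | zero => rfl
  | succ k ih =>
    simp only [pvSkipSp, List.getD_append _ _ _ _ (by omega : k < cs.length)]
    split <;> [exact ih (by omega); rfl]

theorem pvFbtLoop_append (cs ys : List Char) (lb k : Nat) (h : k ≤ cs.length) :
    pvFbtLoop (cs ++ ys) lb k = pvFbtLoop cs lb k := by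
  induction k using Nat.strong_induction_on generalizing lb with
  | _ k ih =>
    rw [pvFbtLoop, pvFbtLoop]
    by_cases hk : k = 0
    · simp [hk]
    · simp only [hk, if_false]
      have hle := pvSkipSp_le cs k
      rw [pvSkipSp_append cs ys k h]
      by_cases hc : 1 ≤ k - pvSkipSp cs k ∧ k - pvSkipSp cs k ≤ 4 ∧ 1 ≤ pvSkipSp cs k ∧ pvBorder (cs.getD (pvSkipSp cs k - 1) '?') = true
      · rw [List.getD_append _ _ _ _ (by omega : pvSkipSp cs k - 1 < cs.length)]
        simp only [hc]
        exact ih _ (by omega) _ (by omega)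
      · rw [List.getD_append _ _ _ _ (by omega : pvSkipSp cs k - 1 < cs.length)]
        simp only [hc, dif_neg, not_false_iff]

theorem pvFbtLoop_le (cs : List Char) (lb k : Nat) : pvFbtLoop cs lb k ≤ max lb k := by
  induction k using Nat.strong_induction_on generalizing lb with
  | _ k ih =>
    rw [pvFbtLoop]
    by_cases hk : k = 0
    · simp [hk]
    · simp only [hk, if_false]
      have hle := pvSkipSp_le cs k
      split
      · next hc => have := ih (pvSkipSp cs k - 1) (by omega) (pvSkipSp cs k - 1); omega
      · omega

theorem pvStep_border (st : Int × Nat) (i : Int) (c : Char) (h : (c == '|' || c == '+') = true) :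
    pvStep st (i, c) = if st.1 ≠ -1 ∧ 1 ≤ st.2 ∧ st.2 ≤ 4 then (st.1, 0) else (i, 0) := by
  simp [pvStep, h]

theorem pvStep_space (st : Int × Nat) (i : Int) :
    pvStep st (i, ' ') = if st.1 ≠ -1 then (st.1, st.2 + 1) else st := by
  simp [pvStep]

theorem pvStep_other (st : Int × Nat) (i : Int) (c : Char)
    (h1 : (c == '|' || c == '+') = false) (h2 : (c == ' ') = false) :
    pvStep st (i, c) = (-1, 0) := by
  simp [pvStep, h1, h2]

theorem pvInv (cs : List Char) :
    (PySem.List.enumerate cs 0).foldl pvStep (-1, 0) =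
      (if pvSkipSp cs cs.length = 0 then ((-1 : Int), 0)
       else if pvBorder (cs.getD (pvSkipSp cs cs.length - 1) '?') = false then ((-1 : Int), 0)
       else (((pvFbtLoop cs (pvSkipSp cs cs.length - 1) (pvSkipSp cs cs.length - 1) : Nat) : Int),
              cs.length - pvSkipSp cs cs.length)) := by
  induction cs using List.reverseRecOn with
  | nil => rfl
  | append_singleton cs c ih =>
    have hgetLast : ∀ d : Char, (cs ++ [c]).getD cs.length d = c := by
      intro d; rw [List.getD_append_right _ _ _ _ (le_refl _)]; simp
    have hn_le := pvSkipSp_le cs cs.length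
    have hfoldl : (PySem.List.enumerate (cs ++ [c]) 0).foldl pvStep (-1, 0) =
        pvStep ((PySem.List.enumerate cs 0).foldl pvStep (-1, 0)) ((cs.length : Int), c) := by
      rw [PySem.List.enumerate_append, List.foldl_append]
      simp [PySem.List.enumerate]
    have hlen : (cs ++ [c]).length = cs.length + 1 := by simp
    have hskip : pvSkipSp (cs ++ [c]) (cs.length + 1) =
        if c == ' ' then pvSkipSp cs cs.length else cs.length + 1 := by
      rw [pvSkipSp.eq_def]
      simp only [hgetLast]
      split
      · rw [pvSkipSp_append cs [c] cs.length (le_refl _)]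
      · rfl
    rw [hfoldl, ih, hlen, hskip]
    set n := pvSkipSp cs cs.length with hn
    by_cases hb : (c == '|' || c == '+') = true
    · have hbeq : (c == ' ') = false := by
        rcases Bool.or_eq_true_iff.1 hb with h | h <;> rw [beq_iff_eq] at h <;> simp [h]
      rw [pvStep_border _ _ _ hb,
        show (if (c == ' ') = true then n else cs.length + 1) = cs.length + 1 from
          if_neg (by simp [hbeq]),
        if_neg (Nat.succ_ne_zero cs.length),
        show (if pvBorder ((cs ++ [c]).getD (cs.length + 1 - 1) '?') = false then ((-1:Int),(0:Nat))
              else (((pvFbtLoop (cs ++ [c]) (cs.length + 1 - 1) (cs.length + 1 - 1) : Nat) : Int),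
                    cs.length + 1 - (cs.length + 1))) =
          (((pvFbtLoop (cs ++ [c]) cs.length cs.length : Nat) : Int), (0:Nat)) from by
            rw [if_neg (by simp [pvBorder, hb])]; simp]
      by_cases hl : cs.length = 0
      · have hcs : cs = [] := List.eq_nil_of_length_eq_zero hl
        subst hcs
        simp [pvSkipSp] at hn
        simp [hn, pvFbtLoop]
      · have hget : (cs ++ [c]).getD (n-1) '?' = cs.getD (n-1) '?' :=
          List.getD_append _ _ _ _ (by omega)
        have hload : pvFbtLoop (cs ++ [c]) cs.length cs.length =
            (if 1 ≤ cs.length - n ∧ cs.length - n ≤ 4 ∧ 1 ≤ n ∧ pvBorder (cs.getD (n-1) '?') = true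
             then pvFbtLoop cs (n-1) (n-1) else cs.length) := by
          rw [pvFbtLoop, if_neg hl, pvSkipSp_append cs [c] cs.length (le_refl _), ← hn]
          show (if _h : 1 ≤ cs.length - n ∧ cs.length - n ≤ 4 ∧ 1 ≤ n ∧
                  pvBorder ((cs ++ [c]).getD (n - 1) '?') = true then
                pvFbtLoop (cs ++ [c]) (n - 1) (n - 1) else cs.length) = _
          rw [hget]
          split_ifs with h
          · exact pvFbtLoop_append cs [c] (n-1) (n-1) (by omega)
          · rfl
        rw [hload]
        by_cases hc : 1 ≤ cs.length - n ∧ cs.length - n ≤ 4 ∧ 1 ≤ n ∧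
            pvBorder (cs.getD (n - 1) '?') = true
        · rw [if_pos hc,
            show (if n = 0 then ((-1:Int),(0:Nat))
                  else if pvBorder (cs.getD (n - 1) '?') = false then ((-1:Int),(0:Nat))
                  else (((pvFbtLoop cs (n-1) (n-1) : Nat) : Int), cs.length - n)) =
              (((pvFbtLoop cs (n-1) (n-1) : Nat) : Int), cs.length - n) from by
                rw [if_neg (by omega : ¬ n = 0), if_neg (show ¬ pvBorder (cs.getD (n-1) '?') = false by simp only [hc.2.2.2]; decide)]]
          have hpos : (0:Int) ≤ ((pvFbtLoop cs (n-1) (n-1) : Nat) : Int) := Int.natCast_nonneg _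
          rw [if_pos ⟨by omega, by omega, by omega⟩]
        · rw [if_neg hc]
          by_cases hn0 : n = 0
          · rw [if_pos hn0, if_neg (by simp : ¬ (((-1:Int),(0:Nat)).1 ≠ -1 ∧ 1 ≤ ((-1:Int),(0:Nat)).2 ∧ ((-1:Int),(0:Nat)).2 ≤ 4))]
          · rw [if_neg hn0]
            by_cases hbrd : pvBorder (cs.getD (n-1) '?') = false
            · rw [if_pos hbrd, if_neg (by simp : ¬ (((-1:Int),(0:Nat)).1 ≠ -1 ∧ 1 ≤ ((-1:Int),(0:Nat)).2 ∧ ((-1:Int),(0:Nat)).2 ≤ 4))]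
            · rw [if_neg hbrd]
              have hpos : (0:Int) ≤ ((pvFbtLoop cs (n-1) (n-1) : Nat) : Int) := Int.natCast_nonneg _
              rw [if_neg (by
                rintro ⟨-, h2, h3⟩
                exact hc ⟨h2, h3, by omega, by simpa using hbrd⟩)]
    · by_cases hsp : c = ' '
      · subst hsp
        rw [pvStep_space,
          show (if ((' ' == ' ') = true) then n else cs.length + 1) = n from if_pos (by decide)]
        by_cases hn0 : n = 0
        · rw [if_pos hn0]
          simp only [if_pos hn0]
          simp
        · have hget : (cs ++ [' ']).getD (n-1) '?' = cs.getD (n-1) '?' :=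
            List.getD_append _ _ _ _ (by omega)
          rw [if_neg hn0, hget]
          simp only [if_neg hn0]
          by_cases hbrd : pvBorder (cs.getD (n-1) '?') = false
          · rw [if_pos hbrd]
            simp only [if_pos hbrd]
            simp
          · rw [if_neg hbrd]
            simp only [if_neg hbrd]
            rw [pvFbtLoop_append cs [' '] (n-1) (n-1) (by omega)]
            have hpos : (0:Int) ≤ ((pvFbtLoop cs (n-1) (n-1) : Nat) : Int) := Int.natCast_nonneg _
            rw [if_pos (show (((pvFbtLoop cs (n-1) (n-1) : Nat) : Int), cs.length - n).1 ≠ -1 by simp only []; omega)]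
            rw [show cs.length + 1 - n = (cs.length - n) + 1 from by omega]
      · have h1 : (c == ' ') = false := by simp [hsp]
        have h2 : (c == '|' || c == '+') = false := by simpa using hb
        rw [pvStep_other _ _ _ h2 h1,
          show (if (c == ' ') = true then n else cs.length + 1) = cs.length + 1 from
            if_neg (by simp [h1]),
          if_neg (Nat.succ_ne_zero cs.length),
          if_pos (show pvBorder ((cs ++ [c]).getD (cs.length + 1 - 1) '?') = false by
            simp [pvBorder, h2])]

theorem pvSkip_full (s : List Char) (hlast : ∀ h : s ≠ [], (s.getLast h == ' ') = false) :
    pvSkipSp s s.length = s.length := by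
  cases s with
  | nil => rfl
  | cons a t =>
    have hne : (a :: t) ≠ [] := by simp
    have hlen : (a :: t).length = t.length + 1 := by simp
    rw [hlen, pvSkipSp]
    have hget : (a :: t).getD t.length '?' = (a :: t).getLast hne := by
      rw [show t.length = (a :: t).length - 1 from by simp,
        List.getD_eq_getElem _ _ (by simp), List.getLast_eq_getElem]
      rfl
    rw [hget, hlast hne]
    simp

theorem pvSkip_full_rstrip (x : List Char) :
    pvSkipSp (PySem.Chars.rstrip x) (PySem.Chars.rstrip x).length = (PySem.Chars.rstrip x).length := by
  apply pvSkip_full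
  intro h
  unfold PySem.Chars.rstrip at *
  rw [List.getLast_reverse h]
  have h' : x.reverse.dropWhile PySem.Chars.isspace ≠ [] := by
    intro hcon; simp_all
  have hthis := List.head_dropWhile_not PySem.Chars.isspace h'
  have hgoal : (x.reverse.dropWhile PySem.Chars.isspace).head h' ≠ ' ' := by
    intro hcon; rw [hcon] at hthis; exact absurd hthis (by decide)
  simpa using hgoal

theorem pvTailStart_eq (s : List Char) (h : pvSkipSp s s.length = s.length) :
    pvTailStart s = pvFindBorderTail s := by
  unfold pvTailStart pvFindBorderTail
  rw [pvInv, h]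
  by_cases h0 : s.length = 0
  · rw [if_pos h0, if_pos h0, if_neg (by simp)]
  · rw [if_neg h0, if_neg h0]
    by_cases hbrd : pvBorder (s.getD (s.length - 1) '?') = false
    · rw [if_pos hbrd, if_pos hbrd, if_neg (by simp)]
    · rw [if_neg hbrd, if_neg hbrd]
      have hpos : (0:Int) ≤ ((pvFbtLoop s (s.length-1) (s.length-1) : Nat) : Int) := Int.natCast_nonneg _
      rw [if_pos ⟨by omega, by omega⟩]

theorem pvGetD_last (xs : List Char) (hne : xs ≠ []) :
    xs.getD (xs.length - 1) '?' = xs.getLast hne := by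
  rw [List.getD_eq_getElem _ _ (by cases xs <;> simp_all), List.getLast_eq_getElem]

theorem pvEndswith_last (xs : List Char) (c : Char) (hne : xs ≠ []) :
    PySem.Chars.endswith xs [c] = (xs.getD (xs.length - 1) '?' == c) := by
  have hx := List.dropLast_concat_getLast hne
  rw [pvGetD_last xs hne]
  rcases eq_or_ne (xs.getLast hne) c with hc | hc
  · have h1 : PySem.Chars.endswith xs [c] = true :=
      (PySem.Chars.endswith_iff _ _).2 ⟨xs.dropLast, by rw [← hc]; exact hx⟩
    rw [h1, hc]; simp
  · have h1 : ¬ [c] <:+ xs := by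
      rintro ⟨t, ht⟩
      subst ht
      exact hc List.getLast_concat
    have h2 : PySem.Chars.endswith xs [c] = false := by
      cases h : PySem.Chars.endswith xs [c] with
      | false => rfl
      | true => exact absurd ((PySem.Chars.endswith_iff _ _).1 h) h1
    rw [h2]
    simp [hc]

theorem pvRstrip_ne_nil (cs : List Char) (h : ¬ (PySem.Chars.strip cs).isEmpty = true) :
    PySem.Chars.rstrip cs ≠ [] := by
  intro hcon
  apply h
  have hd : List.dropWhile PySem.Chars.isspace cs.reverse = [] := by
    rw [PySem.Chars.rstrip] at hcon
    exact List.reverse_eq_nil_iff.mp hcon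
  have hall := List.dropWhile_eq_nil_iff.1 hd
  have hls : PySem.Chars.lstrip cs = [] := by
    rw [PySem.Chars.lstrip, List.dropWhile_eq_nil_iff]
    intro c hc
    exact hall c (by simpa using hc)
  rw [PySem.Chars.strip, hls]
  rfl

theorem pvFBT_bound (s : List Char) (h0 : 0 ≤ pvFindBorderTail s) :
    (pvFindBorderTail s).toNat < s.length ∧
    pvBorder (s.getD (pvSkipSp s s.length - 1) '?') = true ∧ 1 ≤ pvSkipSp s s.length := by
  have hle := pvSkipSp_le s s.length
  unfold pvFindBorderTail at h0 ⊢
  by_cases h1 : pvSkipSp s s.length = 0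
  · rw [if_pos h1] at h0; omega
  · rw [if_neg h1] at h0 ⊢
    by_cases h2 : pvBorder (s.getD (pvSkipSp s s.length - 1) '?') = false
    · rw [if_pos h2] at h0; omega
    · rw [if_neg h2] at h0 ⊢
      refine ⟨?_, by simpa using h2, by omega⟩
      have hfl := pvFbtLoop_le s (pvSkipSp s s.length - 1) (pvSkipSp s s.length - 1)
      simp only [Int.toNat_natCast]
      omega

theorem pvPyGetD_neg_one (xs : List Char) (hne : xs ≠ []) :
    PySem.List.pyGetD xs (-1) '?' = xs.getD (xs.length - 1) '?' := by
  have hl : 0 < xs.length := List.length_pos_iff.mpr hne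
  simp only [PySem.List.pyGetD, PySem.List.pyGet?, PySem.List.pyIdx?]
  rw [if_neg (by omega), if_pos (by omega : -(xs.length : Int) ≤ -1)]
  simp [List.getD_eq_getElem?_getD]

def pvLineA (max_len : Int) (l : String) : String :=
  let cs := l.toList
  if (PySem.Chars.strip cs).isEmpty ∨ max_len ≤ PySem.Str.len l then l
  else
    let diff := (max_len - PySem.Str.len l).toNat
    let stripped := PySem.Chars.rstrip cs
    let tail_pos := pvFindBorderTail stripped
    if 0 < tail_pos then
      let content := PySem.List.slice stripped none (some tail_pos)
      let tail := PySem.List.slice stripped (some tail_pos) none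
      if PySem.Chars.endswith content ['-'] || PySem.Chars.endswith content ['='] then
        String.ofList (content ++ List.replicate diff '-' ++ tail)
      else String.ofList (content ++ List.replicate diff ' ' ++ tail)
    else if PySem.Chars.endswith stripped ['|'] then
      String.ofList (PySem.List.slice stripped none (some (-1)) ++ List.replicate diff ' ' ++ ['|'])
    else if PySem.Chars.endswith stripped ['+'] then
      String.ofList (PySem.List.slice stripped none (some (-1)) ++ List.replicate diff '-' ++ ['+'])
    else String.ofList (cs ++ List.replicate diff ' ')

theorem pvLineA_eq (l : String) (max_len : Int) :
    pvLineA max_len l = pvPadLine l max_len := by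
  simp only [pvLineA, pvPadLine]
  by_cases hg : (PySem.Chars.strip l.toList).isEmpty = true ∨ max_len ≤ PySem.Str.len l
  · rw [if_pos hg, if_pos hg]
  · rw [if_neg hg, if_neg hg]
    have hsne : PySem.Chars.rstrip l.toList ≠ [] :=
      pvRstrip_ne_nil l.toList (fun h => hg (Or.inl h))
    set s := PySem.Chars.rstrip l.toList with hs
    have hskipfull : pvSkipSp s s.length = s.length := pvSkip_full_rstrip l.toList
    have hts : pvTailStart s = pvFindBorderTail s := pvTailStart_eq s hskipfull
    rw [hts]
    set t := pvFindBorderTail s with ht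
    set diff := (max_len - PySem.Str.len l).toNat with hdiff
    by_cases htp : 0 < t
    · rw [if_pos htp, if_pos htp]
      obtain ⟨hlt, -, -⟩ := pvFBT_bound s (by omega)
      rw [← ht] at hlt
      have hclen : (s.take t.toNat).length = t.toNat := by
        rw [List.length_take]; omega
      have hcne : s.take t.toNat ≠ [] := by
        intro hcon
        rw [hcon] at hclen
        simp at hclen
        omega
      have hcl : (s.take t.toNat).getD ((s.take t.toNat).length - 1) '?' = s.getD (t.toNat - 1) '?' := by
        rw [hclen, List.getD_eq_getElem _ _ (by omega), List.getD_eq_getElem _ _ (by omega)]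
        simp [List.getElem_take]
      have hpg : PySem.List.pyGetD s (t-1) '?' = s.getD (t.toNat - 1) '?' := by
        rw [show (t - 1 : Int) = ((t.toNat - 1 : Nat) : Int) from by omega, PySem.List.pyGetD_natCast]
      rw [PySem.List.slice_to s (by omega : (0:Int) ≤ t),
        PySem.List.slice_from s (by omega : (0:Int) ≤ t),
        pvEndswith_last _ '-' hcne, pvEndswith_last _ '=' hcne, hcl, hpg]
      by_cases hch : s.getD (t.toNat - 1) '?' = '-' ∨ s.getD (t.toNat - 1) '?' = '='
      · rw [if_pos hch, if_pos (show ((s.getD (t.toNat - 1) '?' == '-') || (s.getD (t.toNat - 1) '?' == '=')) = true from by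
          rcases hch with h | h <;> rw [h] <;> decide)]
      · rw [if_neg hch, if_neg (show ¬ ((s.getD (t.toNat - 1) '?' == '-') || (s.getD (t.toNat - 1) '?' == '=')) = true from by
          simp only [Bool.or_eq_true, beq_iff_eq]; exact hch)]
    · rw [if_neg htp, if_neg htp]
      have hpg1 : PySem.List.pyGetD s (-1) '?' = s.getD (s.length - 1) '?' :=
        pvPyGetD_neg_one s hsne
      by_cases ht0 : t = 0
      · rw [if_pos ht0]
        have hb2 := pvFBT_bound s (by omega)
        rw [hskipfull] at hb2
        have hbord : pvBorder (s.getD (s.length - 1) '?') = true := hb2.2.1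
        have hor : s.getD (s.length - 1) '?' = '|' ∨ s.getD (s.length - 1) '?' = '+' := by
          simpa [pvBorder] using hbord
        rw [pvEndswith_last _ '|' hsne, pvEndswith_last _ '+' hsne, hpg1]
        rcases hor with hcase | hcase
        · rw [hcase,
            if_pos (show (('|' : Char) == '|') = true from by decide),
            if_neg (show ¬ (('|' : Char) = '+') from by decide)]
        · rw [hcase,
            if_neg (show ¬ (('+' : Char) == '|') = true from by decide),
            if_pos (show (('+' : Char) == '+') = true from by decide),
            if_pos (show (('+' : Char) = '+') from rfl)]
      · rw [if_neg ht0]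
        have hnb : pvBorder (s.getD (s.length - 1) '?') = false := by
          by_contra hcon
          have hbt : pvBorder (s.getD (s.length - 1) '?') = true := by simpa using hcon
          have : (0:Int) ≤ t := by
            rw [ht]
            unfold pvFindBorderTail
            rw [hskipfull, if_neg (by simpa using hsne : ¬ s.length = 0),
              if_neg (show ¬ pvBorder (s.getD (s.length - 1) '?') = false from by rw [hbt]; decide)]
            exact Int.natCast_nonneg _
          omega
        rw [pvEndswith_last _ '|' hsne, pvEndswith_last _ '+' hsne]
        have h1 : s.getD (s.length - 1) '?' ≠ '|' := by
          intro hcon; rw [hcon] at hnb; exact absurd hnb (by decide)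
        have h2 : s.getD (s.length - 1) '?' ≠ '+' := by
          intro hcon; rw [hcon] at hnb; exact absurd hnb (by decide)
        rw [if_neg (by simpa using h1), if_neg (by simpa using h2)]

theorem pv_main (block : List String) : pad_block block = pad_block_alt block := by
  simp only [pad_block, pad_block_alt, List.isEmpty_map]
  by_cases he : (block.filter (fun l => !(PySem.Chars.strip l.toList).isEmpty)).isEmpty = true
  · rw [if_pos he, if_pos he]
  · rw [if_neg he, if_neg he]
    cases hmax : PySem.List.max? ((block.filter (fun l => !(PySem.Chars.strip l.toList).isEmpty)).map PySem.Str.len) (fun x => x) with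
    | none => rfl
    | some max_len =>
      show List.foldl _ [] block = List.map (fun l => pvPadLine l max_len) block
      have hb : (fun (result : List String) (l : String) =>
          if (PySem.Chars.strip l.toList).isEmpty = true ∨ max_len ≤ PySem.Str.len l then result ++ [l]
          else
            if 0 < pvFindBorderTail (PySem.Chars.rstrip l.toList) then
              if (PySem.Chars.endswith (PySem.List.slice (PySem.Chars.rstrip l.toList) none (some (pvFindBorderTail (PySem.Chars.rstrip l.toList)))) ['-'] ||
                  PySem.Chars.endswith (PySem.List.slice (PySem.Chars.rstrip l.toList) none (some (pvFindBorderTail (PySem.Chars.rstrip l.toList)))) ['=']) = true then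
                result ++ [String.ofList (PySem.List.slice (PySem.Chars.rstrip l.toList) none (some (pvFindBorderTail (PySem.Chars.rstrip l.toList))) ++ List.replicate (max_len - PySem.Str.len l).toNat '-' ++ PySem.List.slice (PySem.Chars.rstrip l.toList) (some (pvFindBorderTail (PySem.Chars.rstrip l.toList))))]
              else
                result ++ [String.ofList (PySem.List.slice (PySem.Chars.rstrip l.toList) none (some (pvFindBorderTail (PySem.Chars.rstrip l.toList))) ++ List.replicate (max_len - PySem.Str.len l).toNat ' ' ++ PySem.List.slice (PySem.Chars.rstrip l.toList) (some (pvFindBorderTail (PySem.Chars.rstrip l.toList))))]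
            else
              if PySem.Chars.endswith (PySem.Chars.rstrip l.toList) ['|'] = true then
                result ++ [String.ofList (PySem.List.slice (PySem.Chars.rstrip l.toList) none (some (-1)) ++ List.replicate (max_len - PySem.Str.len l).toNat ' ' ++ ['|'])]
              else
                if PySem.Chars.endswith (PySem.Chars.rstrip l.toList) ['+'] = true then
                  result ++ [String.ofList (PySem.List.slice (PySem.Chars.rstrip l.toList) none (some (-1)) ++ List.replicate (max_len - PySem.Str.len l).toNat '-' ++ ['+'])]
                else result ++ [String.ofList (l.toList ++ List.replicate (max_len - PySem.Str.len l).toNat ' ')])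
        = (fun (result : List String) (l : String) => result ++ [pvLineA max_len l]) := by
        funext r l
        simp only [pvLineA]
        split_ifs <;> rfl
      rw [hb, PySem.List.foldl_append_singleton_eq_map]
      simp only [List.nil_append]
      exact List.map_congr_left fun l _ => pvLineA_eq l max_len

-- ===== VERDICT (by name: the statement is the Claim_ definition above) =====
theorem pad_block_spec : Claim_equal_pad_block := by
  intro block _
  exact pv_main block
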